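-- pv_equiv track=rewrite | github.com/dishasingh4851/phishguard1 | app.py | normalize_domain
-- ===== SOURCE A (Python) =====
-- def normalize_domain(domain):
--     replacements = {
--         "0": "o",
--         "1": "l",
--         "3": "e",
--         "5": "s",
--         "@": "a"
--     }
--     for k, v in replacements.items():
--         domain = domain.replace(k, v)
--     return domain
-- ===== SOURCE B (Python) =====
-- def normalize_domain(domain):
--     out = []
--     for c in domain:
--         if c == "0":
--             out.append("o")
--         elif c == "1":
--             out.append("l")
--         elif c == "3":
--             out.append("e")
--         elif c == "5":
--             out.append("s")
--         elif c == "@":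
--             out.append("a")
--         else:
--             out.append(c)
--     return "".join(out)
-- ===== Notes on version B (the rewrite author's own statement) =====
-- stated objective: alternative
-- what changed: B makes a single pass over the input characters with an explicit if/elif chain appending to an accumulator list joined at the end, instead of A's five successive whole-string replace() scans driven by a dict; no dict is used at all.
import Mathlib
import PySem

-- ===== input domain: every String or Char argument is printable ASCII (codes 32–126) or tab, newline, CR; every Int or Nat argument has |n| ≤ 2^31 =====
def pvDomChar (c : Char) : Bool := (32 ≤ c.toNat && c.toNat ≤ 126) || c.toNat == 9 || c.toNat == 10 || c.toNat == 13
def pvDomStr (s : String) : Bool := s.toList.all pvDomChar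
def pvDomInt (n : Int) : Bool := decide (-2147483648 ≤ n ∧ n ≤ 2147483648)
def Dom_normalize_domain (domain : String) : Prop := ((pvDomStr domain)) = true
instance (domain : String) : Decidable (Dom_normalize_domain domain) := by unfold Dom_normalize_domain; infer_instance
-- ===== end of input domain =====

-- B replaces A's five successive dict-driven whole-string replace() scans by a single
-- pass over the characters with an if/elif chain and an accumulator (objective: alternative).

-- ===== PORT A =====
def normalize_domain (domain : String) : String :=
  let replacements : PySem.Dict String String :=
    PySem.Dict.ofList [("0", "o"), ("1", "l"), ("3", "e"), ("5", "s"), ("@", "a")]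
  replacements.items.foldl (fun d kv => PySem.Str.replace d kv.1 kv.2) domain

-- ===== PORT B =====
-- the body of Source B's if/elif chain for one character
def ndRepl (c : Char) : String :=
  if c = '0' then "o"
  else if c = '1' then "l"
  else if c = '3' then "e"
  else if c = '5' then "s"
  else if c = '@' then "a"
  else String.singleton c

def normalize_domain_alt (domain : String) : String :=
  PySem.Str.join ""
    (domain.toList.foldl (fun out c => out ++ [ndRepl c]) [])

-- ===== PRECONDITION & SPEC =====
def Spec_normalize_domain (domain : String) (out : String) : Prop := out = normalize_domain_alt domain
instance (domain : String) (out : String) : Decidable (Spec_normalize_domain domain out) := by unfold Spec_normalize_domain; infer_instance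

-- ===== CLAIM (what is proved, stated in full; the proofs are below) =====
def Claim_equal_normalize_domain : Prop := ∀ (domain : String), Dom_normalize_domain domain → Spec_normalize_domain domain (normalize_domain domain)

-- ===== LEMMAS AND PROOFS =====

-- replace with a single-char pattern and single-char replacement is a per-character map
theorem go_single (k v : Char) :
    ∀ (fuel : Nat) (l acc : List Char), l.length ≤ fuel →
      PySem.Chars.replace.go [k] [v] fuel l acc
        = acc.reverse ++ l.map (fun c => if c = k then v else c) := by
  intro fuel
  induction fuel with
  | zero =>
      intro l acc h
      have : l = [] := List.length_eq_zero_iff.mp (Nat.le_zero.mp h)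
      subst this
      simp [PySem.Chars.replace.go]
  | succ n ih =>
      intro l acc h
      cases l with
      | nil => simp [PySem.Chars.replace.go]
      | cons c t =>
          by_cases hc : c = k
          · subst hc
            have hpre : List.isPrefixOf [c] (c :: t) = true := by
              simp [List.isPrefixOf]
            simp only [PySem.Chars.replace.go, hpre, if_pos]
            rw [show List.drop [c].length (c :: t) = t from rfl]
            rw [ih t ([v].reverse ++ acc) (by simpa using Nat.le_of_succ_le_succ h)]
            simp
          · have hpre : List.isPrefixOf [k] (c :: t) = false := by
              simp [List.isPrefixOf]
              exact fun h' => absurd h'.symm hc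
            simp only [PySem.Chars.replace.go, hpre]
            rw [if_neg (by simp)]
            rw [ih t (c :: acc) (by simpa using Nat.le_of_succ_le_succ h)]
            simp [hc]

theorem replace_single (k v : Char) (s : List Char) :
    PySem.Chars.replace s [k] [v] = s.map (fun c => if c = k then v else c) := by
  have : ([k] : List Char).isEmpty = false := rfl
  simp only [PySem.Chars.replace, this, Bool.false_eq_true, if_false]
  simpa using go_single k v s.length s [] le_rfl

-- the composed per-character function of A's five passes
def ndMap (c : Char) : Char :=
  if c = '0' then 'o' else if c = '1' then 'l' else if c = '3' then 'e' else
  if c = '5' then 's' else if c = '@' then 'a' else c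

theorem a_toList (domain : String) :
    (normalize_domain domain).toList = domain.toList.map ndMap := by
  show (PySem.Str.replace (PySem.Str.replace (PySem.Str.replace (PySem.Str.replace
        (PySem.Str.replace domain "0" "o") "1" "l") "3" "e") "5" "s") "@" "a").toList
      = domain.toList.map ndMap
  simp only [PySem.Str.toList_replace]
  show PySem.Chars.replace (PySem.Chars.replace (PySem.Chars.replace (PySem.Chars.replace
        (PySem.Chars.replace domain.toList ['0'] ['o']) ['1'] ['l']) ['3'] ['e']) ['5'] ['s']) ['@'] ['a']
      = domain.toList.map ndMap
  simp only [replace_single, List.map_map]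
  apply List.map_congr_left
  intro c _
  simp only [Function.comp, ndMap]
  by_cases h0 : c = '0' <;> by_cases h1 : c = '1' <;> by_cases h3 : c = '3' <;>
    by_cases h5 : c = '5' <;> by_cases ha : c = '@' <;> simp_all

theorem ndRepl_toList (c : Char) : (ndRepl c).toList = [ndMap c] := by
  unfold ndRepl ndMap
  by_cases h0 : c = '0' <;> by_cases h1 : c = '1' <;> by_cases h3 : c = '3' <;>
    by_cases h5 : c = '5' <;> by_cases ha : c = '@' <;> simp_all

theorem foldl_app (f : Char → String) :
    ∀ (l : List Char) (acc : List String),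
      l.foldl (fun out c => out ++ [f c]) acc = acc ++ l.map f := by
  intro l
  induction l with
  | nil => simp
  | cons c t ih => intro acc; simp [List.foldl_cons, ih]

theorem b_toList (domain : String) :
    (normalize_domain_alt domain).toList = domain.toList.map ndMap := by
  show (PySem.Str.join ""
      (domain.toList.foldl (fun out c => out ++ [ndRepl c]) [])).toList
      = domain.toList.map ndMap
  rw [foldl_app, List.nil_append, PySem.Str.toList_join]
  simp only [List.map_map, Function.comp_def, ndRepl_toList]
  have : (fun c => [ndMap c]) = (fun x => [x]) ∘ ndMap := rfl
  rw [show (String.toList "") = [] from rfl, this, ← List.map_map,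
    PySem.Chars.join_nil_singletons]

-- ===== VERDICT (by name: the statement is the Claim_ definition above) =====
theorem normalize_domain_spec : Claim_equal_normalize_domain := by
  intro domain _
  unfold Spec_normalize_domain
  have h := (a_toList domain).trans (b_toList domain).symm
  exact String.toList_inj.mp h
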